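-- pv_equiv track=rewrite | github.com/OscarRayleigh/special_math | stat2/stat2.py | mat2ncrois
-- ===== SOURCE A (Python) =====
-- def mat2ncrois(par):
--
--     liste = par.copy()
--     liste_finale = []
--
--     while liste:
--         min = liste[0]
--         for x in liste:
--             temp = x[0]
--             if temp < min[0]:
--                 min = x
--         liste_finale.append(min)
--         liste.remove(min)
--     return liste_finale
-- ===== SOURCE B (Python) =====
-- def mat2ncrois(par):
--     return sorted(par, key=lambda x: x[0])
-- ===== Notes on version B (the rewrite author's own statement) =====
-- stated objective: idiomatic
-- what changed: Replaces the quadratic selection-sort loop (repeated scan for the minimum first element plus list.remove) with a single call to the built-in stable sorted() keyed on the first element.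
import Mathlib
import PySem

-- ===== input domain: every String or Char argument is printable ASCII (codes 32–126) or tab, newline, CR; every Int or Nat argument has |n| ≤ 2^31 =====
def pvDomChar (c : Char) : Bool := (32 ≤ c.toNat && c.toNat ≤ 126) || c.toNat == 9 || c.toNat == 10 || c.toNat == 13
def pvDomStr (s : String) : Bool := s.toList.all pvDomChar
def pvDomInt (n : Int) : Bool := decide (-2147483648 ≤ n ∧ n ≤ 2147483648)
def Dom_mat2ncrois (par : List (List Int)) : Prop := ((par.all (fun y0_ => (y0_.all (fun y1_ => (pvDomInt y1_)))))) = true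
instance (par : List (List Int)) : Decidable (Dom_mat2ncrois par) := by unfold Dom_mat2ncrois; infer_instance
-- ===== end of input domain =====

-- B replaces A's quadratic selection-sort loop by one call to the stable library sort keyed on x[0] (idiomatic).


-- ===== PORT A =====
-- x[0]; total via default 0, exact under Pre_ (all sublists nonempty)
def pvKey (x : List Int) : Int := PySem.List.pyGetD x 0 0

-- the body of A's inner 'for x in liste' loop: if x[0] < min[0] then min = x
def pvStep (mn : List Int) (x : List Int) : List Int := if pvKey x < pvKey mn then x else mn

-- A's inner loop: min = liste[0]; for x in liste: if x[0] < min[0]: min = x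
def pvMin (liste : List (List Int)) (first : List Int) : List Int := liste.foldl pvStep first

-- termination helper: the fold result is the initial value or an element of the list
theorem pvFoldStep_mem (l : List (List Int)) (a : List Int) :
    l.foldl pvStep a ∈ a :: l := by
  induction l generalizing a with
  | nil => simp
  | cons b t ih =>
    have h := ih (pvStep a b)
    by_cases hb : pvKey b < pvKey a <;> simp [pvStep, hb] at h ⊢ <;> tauto

theorem pvMin_mem (a : List Int) (rest : List (List Int)) :
    pvMin (a :: rest) a ∈ a :: rest := by
  have h := pvFoldStep_mem rest (pvStep a a)
  have ha : pvStep a a = a := by simp [pvStep]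
  rw [ha] at h
  unfold pvMin
  rw [List.foldl_cons, ha]
  rcases List.mem_cons.mp h with h' | h'
  · rw [h']; exact List.mem_cons_self
  · exact List.mem_cons_of_mem _ h'

-- A's while loop: pick the minimum by scanning, append it, remove it ('liste.remove(min)' = List.erase, first value-equal occurrence)
def pvSelLoop : List (List Int) → List (List Int)
  | [] => []
  | a :: rest =>
    pvMin (a :: rest) a :: pvSelLoop ((a :: rest).erase (pvMin (a :: rest) a))
  termination_by l => l.length
  decreasing_by
    rw [List.length_erase_of_mem (pvMin_mem a rest)]
    simp

def mat2ncrois (par : List (List Int)) : List (List Int) := pvSelLoop par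

-- ===== PORT B =====
-- Source B: return sorted(par, key=lambda x: x[0])  (stable library sort)
def mat2ncrois_alt (par : List (List Int)) : List (List Int) :=
  PySem.List.sorted par pvKey false

-- ===== PRECONDITION & SPEC =====
-- Pre_: every sublist nonempty — if some sublist is empty, the Python A raises IndexError at x[0] (and B raises it inside the key too)
def Pre_mat2ncrois (par : List (List Int)) : Prop := ∀ x ∈ par, x ≠ []
instance (par : List (List Int)) : Decidable (Pre_mat2ncrois par) := by unfold Pre_mat2ncrois; infer_instance
def pvWitness_mat2ncrois : List (List Int) := [[3, 1], [1, 2], [2]]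

def Spec_mat2ncrois (par : List (List Int)) (out : List (List Int)) : Prop := out = mat2ncrois_alt par
instance (par : List (List Int)) (out : List (List Int)) : Decidable (Spec_mat2ncrois par out) := by unfold Spec_mat2ncrois; infer_instance

-- ===== CLAIM (what is proved, stated in full; the proofs are below) =====
def Claim_equal_mat2ncrois : Prop := ∀ (par : List (List Int)), Dom_mat2ncrois par → Pre_mat2ncrois par → Spec_mat2ncrois par (mat2ncrois par)

-- ===== LEMMAS AND PROOFS =====

-- the elements of l whose first-element key is k, in order (stability = equality of all these filters)
def pvF (k : Int) (l : List (List Int)) : List (List Int) :=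
  l.filter (fun x => decide (pvKey x = k))

theorem pvF_nil (k : Int) : pvF k [] = [] := rfl

theorem pvF_cons (k : Int) (a : List Int) (l : List (List Int)) :
    pvF k (a :: l) = if pvKey a = k then a :: pvF k l else pvF k l := by
  simp [pvF, List.filter_cons]

theorem pvF_append (k : Int) (l₁ l₂ : List (List Int)) :
    pvF k (l₁ ++ l₂) = pvF k l₁ ++ pvF k l₂ := by
  simp [pvF]

-- the fold result is a minimum of init and the list
theorem pvFoldStep_le (l : List (List Int)) (a : List Int) :
    ∀ x ∈ a :: l, pvKey (l.foldl pvStep a) ≤ pvKey x := by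
  induction l generalizing a with
  | nil =>
    intro x hx
    rcases List.mem_cons.mp hx with rfl | hx'
    · exact le_rfl
    · exact absurd hx' List.not_mem_nil
  | cons b t ih =>
    intro x hx
    have hfold : (b :: t).foldl pvStep a = t.foldl pvStep (pvStep a b) := by
      simp [List.foldl_cons]
    have hinit : pvKey (t.foldl pvStep (pvStep a b)) ≤ pvKey (pvStep a b) :=
      ih (pvStep a b) (pvStep a b) List.mem_cons_self
    have hstep_a : pvKey (pvStep a b) ≤ pvKey a := by
      unfold pvStep; split
      · exact le_of_lt ‹_›
      · exact le_rfl
    have hstep_b : pvKey (pvStep a b) ≤ pvKey b := by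
      unfold pvStep; split
      · exact le_rfl
      · exact le_of_not_gt ‹_›
    rw [hfold]
    rcases List.mem_cons.mp hx with rfl | hx'
    · exact le_trans hinit hstep_a
    · rcases List.mem_cons.mp hx' with rfl | hx''
      · exact le_trans hinit hstep_b
      · exact ih (pvStep a b) x (List.mem_cons_of_mem _ hx'')

-- scanning the whole list with init = head is the same as scanning the tail
theorem pvMin_eq (a : List Int) (rest : List (List Int)) :
    pvMin (a :: rest) a = rest.foldl pvStep a := by
  unfold pvMin
  rw [List.foldl_cons]
  simp [pvStep]

theorem pvMin_le (a : List Int) (rest : List (List Int)) :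
    ∀ x ∈ a :: rest, pvKey (pvMin (a :: rest) a) ≤ pvKey x := by
  rw [pvMin_eq]
  exact pvFoldStep_le rest a

-- the scan picks the FIRST minimum: everything strictly before it has a strictly larger key
theorem pvFirstMin_split (l : List (List Int)) (a : List Int) :
    ∃ p s, a :: l = p ++ (l.foldl pvStep a) :: s ∧
      ∀ y ∈ p, pvKey (l.foldl pvStep a) < pvKey y := by
  induction l generalizing a with
  | nil => exact ⟨[], [], by simp, by simp⟩
  | cons b t ih =>
    by_cases hb : pvKey b < pvKey a
    · have hfold : (b :: t).foldl pvStep a = t.foldl pvStep b := by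
        simp [List.foldl_cons, pvStep, hb]
      obtain ⟨p, s, hps, hgt⟩ := ih b
      refine ⟨a :: p, s, ?_, ?_⟩
      · rw [hfold]; simpa using congrArg (a :: ·) hps
      · intro y hy
        rw [hfold]
        rcases List.mem_cons.mp hy with rfl | hy'
        · have := pvFoldStep_le t b b List.mem_cons_self
          exact lt_of_le_of_lt this hb
        · exact hgt y hy'
    · have hfold : (b :: t).foldl pvStep a = t.foldl pvStep a := by
        simp [List.foldl_cons, pvStep, hb]
      obtain ⟨p, s, hps, hgt⟩ := ih a
      rw [hfold]
      set M := t.foldl pvStep a with hM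
      cases p with
      | nil =>
        rw [List.nil_append] at hps
        obtain ⟨h1, h2⟩ := List.cons_eq_cons.mp hps
        refine ⟨[], b :: s, ?_, by simp⟩
        rw [← h1, h2, List.nil_append]
      | cons c p' =>
        rw [List.cons_append] at hps
        obtain ⟨h1, h2⟩ := List.cons_eq_cons.mp hps
        subst h1
        refine ⟨a :: b :: p', s, ?_, ?_⟩
        · rw [List.cons_append, List.cons_append, ← h2]
        · intro y hy
          rcases List.mem_cons.mp hy with rfl | hy'
          · exact hgt y List.mem_cons_self
          · rcases List.mem_cons.mp hy' with rfl | hy''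
            · exact lt_of_lt_of_le (hgt a List.mem_cons_self) (le_of_not_gt hb)
            · exact hgt y (List.mem_cons_of_mem _ hy'')

-- the first minimum splits the list, stated for pvMin
theorem pvMin_split (a : List Int) (rest : List (List Int)) :
    ∃ p s, a :: rest = p ++ (pvMin (a :: rest) a) :: s ∧
      ∀ y ∈ p, pvKey (pvMin (a :: rest) a) < pvKey y := by
  rw [pvMin_eq]
  exact pvFirstMin_split rest a

-- selection sort is a permutation of its input
theorem pvSelLoop_perm (l : List (List Int)) : (pvSelLoop l).Perm l := by
  induction l using pvSelLoop.induct with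
  | case1 => simp [pvSelLoop]
  | case2 a rest ih =>
    rw [pvSelLoop]
    exact (ih.cons _).trans (List.perm_cons_erase (pvMin_mem a rest)).symm

-- selection sort output is ordered by key
theorem pvSelLoop_pairwise (l : List (List Int)) :
    (pvSelLoop l).Pairwise (fun x y => pvKey x ≤ pvKey y) := by
  induction l using pvSelLoop.induct with
  | case1 => simp [pvSelLoop]
  | case2 a rest ih =>
    rw [pvSelLoop]
    refine List.Pairwise.cons ?_ ih
    intro y hy
    have hy' : y ∈ (a :: rest).erase (pvMin (a :: rest) a) :=
      ((pvSelLoop_perm _).mem_iff).mp hy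
    exact pvMin_le a rest y (List.mem_of_mem_erase hy')

-- selection sort is stable: it preserves each key-class filter
theorem pvSelLoop_filter (l : List (List Int)) (k : Int) :
    pvF k (pvSelLoop l) = pvF k l := by
  induction l using pvSelLoop.induct with
  | case1 => simp [pvSelLoop]
  | case2 a rest ih =>
    rw [pvSelLoop]
    set m := pvMin (a :: rest) a with hm
    obtain ⟨p, s, hps, hgt⟩ := pvMin_split a rest
    rw [← hm] at hps hgt
    have hmp : m ∉ p := fun h => lt_irrefl _ (hgt _ h)
    have herase : (a :: rest).erase m = p ++ s := by
      rw [hps, List.erase_append_right _ hmp, List.erase_cons_head]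
    rw [herase] at ih
    rw [pvF_cons, herase, ih, pvF_append]
    conv_rhs => rw [hps, pvF_append, pvF_cons]
    by_cases hk : pvKey m = k
    · have hp : pvF k p = [] := by
        simp only [pvF, List.filter_eq_nil_iff, decide_eq_true_eq]
        intro y hy hyk
        exact absurd (hyk ▸ hk ▸ hgt y hy) (lt_irrefl _)
      simp [hk, hp]
    · simp [hk]

-- Python's stable insertion step (the library sort is its left fold)
def pvIns (x : List Int) (acc : List (List Int)) : List (List Int) :=
  PySem.List.insertBy (fun a b => decide (pvKey a < pvKey b)) x acc

theorem pvIns_pairwise (x : List Int) (acc : List (List Int))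
    (h : acc.Pairwise (fun a b => pvKey a ≤ pvKey b)) :
    (pvIns x acc).Pairwise (fun a b => pvKey a ≤ pvKey b) := by
  induction acc with
  | nil => unfold pvIns; rw [PySem.List.insertBy]; simp
  | cons y ys ih =>
    rcases List.pairwise_cons.mp h with ⟨hy, hys⟩
    unfold pvIns
    rw [PySem.List.insertBy]
    by_cases hlt : pvKey x < pvKey y
    · rw [if_pos (by simp [hlt])]
      refine List.Pairwise.cons ?_ h
      intro z hz
      rcases List.mem_cons.mp hz with rfl | hz'
      · exact le_of_lt hlt
      · exact le_of_lt (lt_of_lt_of_le hlt (hy z hz'))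
    · rw [if_neg (by simp [hlt])]
      refine List.Pairwise.cons ?_ (ih hys)
      intro z hz
      rcases (PySem.List.mem_insertBy _ x z ys).mp hz with rfl | hz'
      · exact le_of_not_gt hlt
      · exact hy z hz'

theorem pvIns_filter (x : List Int) (acc : List (List Int)) (k : Int)
    (h : acc.Pairwise (fun a b => pvKey a ≤ pvKey b)) :
    pvF k (pvIns x acc) = if pvKey x = k then pvF k acc ++ [x] else pvF k acc := by
  induction acc with
  | nil =>
    unfold pvIns; rw [PySem.List.insertBy]
    by_cases hk : pvKey x = k <;> simp [pvF, hk]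
  | cons y ys ih =>
    rcases List.pairwise_cons.mp h with ⟨hy, hys⟩
    unfold pvIns
    rw [PySem.List.insertBy]
    by_cases hlt : pvKey x < pvKey y
    · rw [if_pos (by simp [hlt])]
      by_cases hk : pvKey x = k
      · have hnil : pvF k (y :: ys) = [] := by
          simp only [pvF, List.filter_eq_nil_iff, decide_eq_true_eq]
          intro z hz hzk
          rcases List.mem_cons.mp hz with rfl | hz'
          · exact absurd (hzk ▸ hlt) (by simp [hk])
          · exact absurd (lt_of_lt_of_le hlt (hzk ▸ hy z hz')) (by simp [hk])
        simp [pvF_cons, hk, hnil]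
      · simp [pvF_cons, hk]
    · rw [if_neg (by simp [hlt])]
      have ihy := ih hys
      unfold pvIns at ihy
      by_cases hyk : pvKey y = k <;> by_cases hk : pvKey x = k <;>
        simp [pvF_cons, hyk, hk, ihy]

theorem pvFoldIns (l : List (List Int)) (acc : List (List Int))
    (h : acc.Pairwise (fun a b => pvKey a ≤ pvKey b)) :
    (l.foldl (fun a x => pvIns x a) acc).Pairwise (fun a b => pvKey a ≤ pvKey b) ∧
      ∀ k, pvF k (l.foldl (fun a x => pvIns x a) acc) = pvF k acc ++ pvF k l := by
  induction l generalizing acc with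
  | nil => exact ⟨h, by simp [pvF]⟩
  | cons x t ih =>
    obtain ⟨hp, hf⟩ := ih (pvIns x acc) (pvIns_pairwise x acc h)
    refine ⟨hp, fun k => ?_⟩
    rw [List.foldl_cons, hf k, pvIns_filter x acc k h, pvF_cons]
    by_cases hk : pvKey x = k <;> simp [hk]

-- the library stable sort preserves each key-class filter
theorem pvSorted_filter (l : List (List Int)) (k : Int) :
    pvF k (PySem.List.sorted l pvKey false) = pvF k l := by
  rw [PySem.List.sorted_eq_foldl_insertBy]
  have h := (pvFoldIns l [] (by simp)).2 k
  simpa [pvIns] using h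

-- a key-ordered list is determined by its key-class filters (uniqueness of the stable sort)
theorem pvUniq (l₁ : List (List Int)) :
    ∀ l₂ : List (List Int), l₁.Pairwise (fun a b => pvKey a ≤ pvKey b) →
      l₂.Pairwise (fun a b => pvKey a ≤ pvKey b) →
      (∀ k, pvF k l₁ = pvF k l₂) → l₁ = l₂ := by
  induction l₁ with
  | nil =>
    intro l₂ _ _ hF
    cases l₂ with
    | nil => rfl
    | cons b t =>
      have h := hF (pvKey b)
      rw [pvF_nil, pvF_cons, if_pos rfl] at h
      exact absurd h.symm (by simp)
  | cons a t₁ ih =>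
    intro l₂ h₁ h₂ hF
    cases l₂ with
    | nil =>
      have h := hF (pvKey a)
      rw [pvF_nil, pvF_cons, if_pos rfl] at h
      exact absurd h (by simp)
    | cons b t₂ =>
      rcases List.pairwise_cons.mp h₁ with ⟨ha, ht₁⟩
      rcases List.pairwise_cons.mp h₂ with ⟨hb, ht₂⟩
      have hkey : pvKey a = pvKey b := by
        by_contra hne
        have h1 := hF (pvKey a)
        rw [pvF_cons, if_pos rfl, pvF_cons, if_neg (fun h => hne h.symm)] at h1
        have hat₂ : a ∈ t₂ := by
          have hmem : a ∈ pvF (pvKey a) t₂ := h1 ▸ List.mem_cons_self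
          exact List.mem_of_mem_filter hmem
        have h2 := hF (pvKey b)
        rw [pvF_cons, if_neg hne, pvF_cons, if_pos rfl] at h2
        have hbt₁ : b ∈ t₁ := by
          have hmem : b ∈ pvF (pvKey b) t₁ := h2 ▸ List.mem_cons_self
          exact List.mem_of_mem_filter hmem
        exact hne (le_antisymm (ha b hbt₁) (hb a hat₂))
      have h1 := hF (pvKey a)
      rw [pvF_cons, if_pos rfl, pvF_cons, if_pos hkey.symm] at h1
      obtain ⟨hab, -⟩ := List.cons.injEq .. ▸ h1
      subst hab
      have ht : ∀ k, pvF k t₁ = pvF k t₂ := by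
        intro k
        have h := hF k
        rw [pvF_cons, pvF_cons] at h
        by_cases hk : pvKey a = k
        · rw [if_pos hk, if_pos hk] at h
          exact (List.cons.injEq .. ▸ h).2
        · rwa [if_neg hk, if_neg hk] at h
      rw [ih t₂ ht₁ ht₂ ht]

-- ===== VERDICT (by name: the statement is the Claim_ definition above) =====
theorem mat2ncrois_spec : Claim_equal_mat2ncrois := by
  intro par _ _
  unfold Spec_mat2ncrois mat2ncrois mat2ncrois_alt
  exact pvUniq (pvSelLoop par) _ (pvSelLoop_pairwise par)
    (PySem.List.sorted_pairwise par pvKey)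
    (fun k => by rw [pvSelLoop_filter, pvSorted_filter])
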